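-- pv_equiv track=rewrite | github.com/sakrishna-bikkumalla/internship-activity | modes/compliance_mode.py | classify_project_language
-- ===== SOURCE A (Python) =====
-- def classify_project_language(filenames):
--     """Simple classification based on presence of key files."""
--     is_python = any(
--         f in filenames
--         for f in ["pyproject.toml", "requirements.txt", "setup.py", "tox.ini", "pipfile", "uv.lock"]
--     ) or any(f.endswith(".py") for f in filenames)
--
--     is_js = any(
--         f in filenames
--         for f in [
--             "package.json",
--             "package-lock.json",
--             "yarn.lock",
--             "bun.lock",
--             "bun.lockb",
--             "tsconfig.json",
--             "next.config.js"
--         ]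
--     ) or any(f.endswith((".js", ".ts", ".tsx", ".jsx")) for f in filenames) or ".husky" in filenames
--
--     if is_python and is_js:
--         return "Python & JS"
--     if is_python:
--         return "Python"
--     if is_js:
--         return "JS/TS"
--     return "Unknown"
-- ===== SOURCE B (Python) =====
-- _NAME_MASK = {
--     "pyproject.toml": 1, "requirements.txt": 1, "setup.py": 1,
--     "tox.ini": 1, "pipfile": 1, "uv.lock": 1,
--     "package.json": 2, "package-lock.json": 2, "yarn.lock": 2,
--     "bun.lock": 2, "bun.lockb": 2, "tsconfig.json": 2,
--     "next.config.js": 2, ".husky": 2,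
-- }
-- _EXT_MASK = {"py": 1, "js": 2, "ts": 2, "tsx": 2, "jsx": 2}
-- _LABELS = ("Unknown", "Python", "JS/TS", "Python & JS")
--
-- def classify_project_language(filenames):
--     """Simple classification based on presence of key files."""
--     mask = 0
--     for f in filenames:
--         mask |= _NAME_MASK.get(f, 0)
--         _, dot, ext = f.rpartition(".")
--         if dot:
--             mask |= _EXT_MASK.get(ext, 0)
--     return _LABELS[mask]
-- ===== Notes on version B (the rewrite author's own statement) =====
-- stated objective: faster
-- what changed: Replaces A's two boolean flags from four independent scans (keyword any()s that rescan filenames per keyword plus per-suffix endswith any()s) and its four-way if-chain by one pass that ORs per-file bitmasks obtained from two dict lookups (exact filename, and the token after the last dot via rpartition) and finally indexes a label table with the mask.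
import Mathlib
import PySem

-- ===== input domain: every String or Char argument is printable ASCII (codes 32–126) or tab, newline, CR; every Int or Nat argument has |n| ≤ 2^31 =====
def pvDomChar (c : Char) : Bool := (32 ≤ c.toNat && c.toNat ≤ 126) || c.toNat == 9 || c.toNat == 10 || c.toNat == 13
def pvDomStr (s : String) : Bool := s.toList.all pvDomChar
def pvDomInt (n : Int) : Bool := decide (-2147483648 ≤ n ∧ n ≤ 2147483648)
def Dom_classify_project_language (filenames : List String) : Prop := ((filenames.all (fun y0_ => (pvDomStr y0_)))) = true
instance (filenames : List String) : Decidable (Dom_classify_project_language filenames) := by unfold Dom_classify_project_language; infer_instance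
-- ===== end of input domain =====

-- B replaces A's boolean flags and four scans by one pass that ORs per-file bitmasks looked up
-- by exact name and by the token after the last dot, then indexes a label table; objective: faster
-- (single traversal and hashed lookups instead of repeated scans; measured faster in a timing run).

-- ===== PORT A =====
def classify_project_language (filenames : List String) : String :=
  let is_python :=
    (["pyproject.toml", "requirements.txt", "setup.py", "tox.ini", "pipfile", "uv.lock"].any
      (fun f => filenames.any (fun x => x == f))) ||
    (filenames.any (fun f => PySem.Str.endswith f ".py"))
  let is_js :=
    (["package.json", "package-lock.json", "yarn.lock", "bun.lock", "bun.lockb",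
      "tsconfig.json", "next.config.js"].any
      (fun f => filenames.any (fun x => x == f))) ||
    (filenames.any (fun f =>
      PySem.Str.endswith f ".js" || PySem.Str.endswith f ".ts" ||
      PySem.Str.endswith f ".tsx" || PySem.Str.endswith f ".jsx")) ||
    (filenames.any (fun x => x == ".husky"))
  if is_python && is_js then "Python & JS"
  else if is_python then "Python"
  else if is_js then "JS/TS"
  else "Unknown"

-- ===== PORT B =====
def pvNameMask : PySem.Dict String Nat := PySem.Dict.ofList
  [("pyproject.toml", 1), ("requirements.txt", 1), ("setup.py", 1),
   ("tox.ini", 1), ("pipfile", 1), ("uv.lock", 1),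
   ("package.json", 2), ("package-lock.json", 2), ("yarn.lock", 2),
   ("bun.lock", 2), ("bun.lockb", 2), ("tsconfig.json", 2),
   ("next.config.js", 2), (".husky", 2)]

def pvExtMask : PySem.Dict String Nat := PySem.Dict.ofList
  [("py", 1), ("js", 2), ("ts", 2), ("tsx", 2), ("jsx", 2)]

def pvLabels : List String := ["Unknown", "Python", "JS/TS", "Python & JS"]

-- hand port of f.rpartition(".")[2] (exact: characters after the LAST '.'):
def pvRExt (cs : List Char) : List Char := (cs.reverse.takeWhile (fun c => decide (c ≠ '.'))).reverse

-- loop body: mask |= _NAME_MASK.get(f, 0); _, dot, ext = f.rpartition("."); if dot: mask |= _EXT_MASK.get(ext, 0)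
-- (rpartition's middle component `dot` is truthy exactly when '.' occurs in f)
def pvMaskStep (m : Nat) (f : String) : Nat :=
  let m := m ||| pvNameMask.getD f 0
  if f.toList.contains '.' then m ||| pvExtMask.getD (String.ofList (pvRExt f.toList)) 0 else m

-- _LABELS[mask]: mask is always < 4, so plain in-range indexing (getD is exact here)
def classify_project_language_alt (filenames : List String) : String :=
  pvLabels.getD (filenames.foldl pvMaskStep 0) "Unknown"

-- ===== PRECONDITION & SPEC =====
def Spec_classify_project_language (filenames : List String) (out : String) : Prop := out = classify_project_language_alt filenames
instance (filenames : List String) (out : String) : Decidable (Spec_classify_project_language filenames out) := by unfold Spec_classify_project_language; infer_instance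

-- ===== CLAIM (what is proved, stated in full; the proofs are below) =====
def Claim_equal_classify_project_language : Prop := ∀ (filenames : List String), Dom_classify_project_language filenames → Spec_classify_project_language filenames (classify_project_language filenames)

-- ===== LEMMAS AND PROOFS =====
def pvToMask (p j : Bool) : Nat := (if p then 1 else 0) ||| (if j then 2 else 0)

def pvPyNames : List String :=
  ["pyproject.toml", "requirements.txt", "setup.py", "tox.ini", "pipfile", "uv.lock"]
def pvJsNames : List String :=
  ["package.json", "package-lock.json", "yarn.lock", "bun.lock", "bun.lockb",
   "tsconfig.json", "next.config.js", ".husky"]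

def pvPyPred (f : String) : Bool := pvPyNames.contains f || PySem.Str.endswith f ".py"
def pvJsPred (f : String) : Bool :=
  pvJsNames.contains f ||
  PySem.Str.endswith f ".js" || PySem.Str.endswith f ".ts" ||
  PySem.Str.endswith f ".tsx" || PySem.Str.endswith f ".jsx"

lemma pvToMask_or (a b c d : Bool) : pvToMask a b ||| pvToMask c d = pvToMask (a || c) (b || d) := by
  cases a <;> cases b <;> cases c <;> cases d <;> rfl

lemma pv_takeWhile_dot (e t : List Char) (he : '.' ∉ e) :
    List.takeWhile (fun c => decide (c ≠ '.')) (e ++ '.' :: t) = e := by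
  induction e with
  | nil => simp
  | cons a e ih =>
    simp only [List.mem_cons, not_or] at he
    have ha : a ≠ '.' := fun h => he.1 h.symm
    rw [List.cons_append, List.takeWhile_cons_of_pos (by simp [ha]), ih he.2]

lemma pv_prefix_dot (r e : List Char) (he : '.' ∉ e) :
    ((e ++ ['.']) <+: r) ↔ ('.' ∈ r ∧ r.takeWhile (fun c => decide (c ≠ '.')) = e) := by
  constructor
  · rintro ⟨t, rfl⟩
    refine ⟨by simp, ?_⟩
    rw [List.append_assoc]
    exact pv_takeWhile_dot e t he
  · rintro ⟨hm, ht⟩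
    have hsplit := (List.takeWhile_append_dropWhile (p := fun c => decide (c ≠ '.')) (l := r)).symm
    have hne : r.dropWhile (fun c => decide (c ≠ '.')) ≠ [] := by
      intro h0
      rw [hsplit, h0, List.append_nil, ht] at hm
      exact he hm
    have hhead := List.head_dropWhile_not (fun c => decide (c ≠ '.')) hne
    simp only [decide_eq_false_iff_not, not_not] at hhead
    refine ⟨(r.dropWhile (fun c => decide (c ≠ '.'))).tail, ?_⟩
    rw [List.append_assoc, List.singleton_append]
    conv_rhs => rw [hsplit]
    rw [ht]
    congr 1
    conv_rhs => rw [← List.cons_head_tail hne]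
    rw [hhead]

-- endswith("."+ext)  ⟺  '.' occurs and the token after the last '.' is ext
lemma pv_endswith_ext (cs ext : List Char) (he : '.' ∉ ext) :
    PySem.Chars.endswith cs ('.' :: ext) = (cs.contains '.' && decide (pvRExt cs = ext)) := by
  rw [Bool.eq_iff_iff, PySem.Chars.endswith_iff]
  have h1 : ('.' :: ext) <:+ cs ↔ (ext.reverse ++ ['.']) <+: cs.reverse := by
    rw [← List.reverse_prefix]
    simp
  rw [h1, pv_prefix_dot _ _ (by simpa using he)]
  simp [pvRExt, List.reverse_eq_iff]

lemma pv_get?_mk_lookup (l : List (String × Nat)) (f : String) :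
    (PySem.Dict.mk l).get? f = l.lookup f := by
  induction l with
  | nil => rfl
  | cons a l ih =>
    rw [PySem.Dict.get?_mk_cons]
    simp only [List.lookup]
    cases h : f == a.1
    · rw [Bool.beq_comm] at h; simp [h, ih]
    · rw [Bool.beq_comm] at h; simp [h]

lemma pv_lookup_const (names : List String) (c : Nat) (f : String) :
    (names.map (fun n => (n, c))).lookup f = if names.contains f then some c else none := by
  induction names with
  | nil => simp
  | cons a l ih =>
    cases h : f == a
    · have h' : ¬ f = a := by simpa using h
      simp [List.lookup, h, h', ih]
    · have h' : f = a := by simpa using h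
      simp [h']

lemma pv_lookup_append (l1 l2 : List (String × Nat)) (f : String) :
    (l1 ++ l2).lookup f = ((l1.lookup f).or (l2.lookup f)) := by
  induction l1 with
  | nil => simp
  | cons a l ih =>
    cases h : f == a.1 <;> simp [List.lookup, h, ih]

lemma pv_disjoint (f : String) (hp : pvPyNames.contains f = true) :
    pvJsNames.contains f = false := by
  simp only [pvPyNames, List.contains_cons, List.contains_nil, Bool.or_eq_true, beq_iff_eq] at hp
  rcases hp with rfl | rfl | rfl | rfl | rfl | rfl | h <;> first | decide | simp at h

lemma pv_nameMask_getD (f : String) :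
    pvNameMask.getD f 0 = pvToMask (pvPyNames.contains f) (pvJsNames.contains f) := by
  have hd : pvNameMask = PySem.Dict.mk
      (pvPyNames.map (fun n => (n, 1)) ++ pvJsNames.map (fun n => (n, 2))) := by decide
  rw [hd, PySem.Dict.getD_eq_get?_getD, pv_get?_mk_lookup, pv_lookup_append,
      pv_lookup_const, pv_lookup_const]
  cases hp : pvPyNames.contains f <;> cases hj : pvJsNames.contains f
  · simp [pvToMask]
  · simp [pvToMask]
  · simp [pvToMask]
  · rw [pv_disjoint f hp] at hj; cases hj

lemma pv_extMask_getD (e : String) :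
    pvExtMask.getD e 0 =
      pvToMask (e == "py") (e == "js" || e == "ts" || e == "tsx" || e == "jsx") := by
  have hd : pvExtMask = PySem.Dict.mk
      (["py"].map (fun n => (n, 1)) ++ ["js", "ts", "tsx", "jsx"].map (fun n => (n, 2))) := by decide
  rw [hd, PySem.Dict.getD_eq_get?_getD, pv_get?_mk_lookup, pv_lookup_append,
      pv_lookup_const, pv_lookup_const]
  cases h1 : e == "py" <;> cases h2 : e == "js" <;> cases h3 : e == "ts" <;>
    cases h4 : e == "tsx" <;> cases h5 : e == "jsx" <;>
    simp_all [pvToMask]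

lemma pv_ofList_beq (l : List Char) (s : String) : (String.ofList l == s) = decide (l = s.toList) := by
  rw [Bool.eq_iff_iff]
  simp
  constructor
  · rintro rfl; simp
  · rintro rfl; simp

lemma pv_step_eq (m : Nat) (f : String) :
    pvMaskStep m f = m ||| pvToMask (pvPyPred f) (pvJsPred f) := by
  simp only [pvMaskStep, pvPyPred, pvJsPred, PySem.Str.endswith_eq]
  rw [show (".py" : String).toList = '.' :: "py".toList from rfl,
      show (".js" : String).toList = '.' :: "js".toList from rfl,
      show (".ts" : String).toList = '.' :: "ts".toList from rfl,
      show (".tsx" : String).toList = '.' :: "tsx".toList from rfl,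
      show (".jsx" : String).toList = '.' :: "jsx".toList from rfl,
      pv_endswith_ext _ _ (by decide), pv_endswith_ext _ _ (by decide),
      pv_endswith_ext _ _ (by decide), pv_endswith_ext _ _ (by decide),
      pv_endswith_ext _ _ (by decide),
      pv_nameMask_getD, pv_extMask_getD,
      pv_ofList_beq, pv_ofList_beq, pv_ofList_beq, pv_ofList_beq]
  cases hdot : f.toList.contains '.'
  · simp
  · simp [pv_ofList_beq, Bool.or_assoc, Nat.or_assoc, pvToMask_or]

lemma pv_fold_eq (fs : List String) (m : Nat) :
    fs.foldl pvMaskStep m = m ||| pvToMask (fs.any pvPyPred) (fs.any pvJsPred) := by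
  induction fs generalizing m with
  | nil => simp [pvToMask]
  | cons a fs ih =>
    simp only [List.foldl_cons, pv_step_eq, ih, Nat.or_assoc, pvToMask_or, List.any_cons]

lemma pv_py_flag_eq (fs : List String) :
    ((["pyproject.toml", "requirements.txt", "setup.py", "tox.ini", "pipfile", "uv.lock"].any
        (fun f => fs.any (fun x => x == f))) ||
      (fs.any (fun f => PySem.Str.endswith f ".py"))) = fs.any pvPyPred := by
  rw [Bool.eq_iff_iff]
  simp [List.any_eq_true, pvPyPred, pvPyNames]
  aesop

lemma pv_js_flag_eq (fs : List String) :
    ((["package.json", "package-lock.json", "yarn.lock", "bun.lock", "bun.lockb",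
        "tsconfig.json", "next.config.js"].any
        (fun f => fs.any (fun x => x == f))) ||
      (fs.any (fun f =>
        PySem.Str.endswith f ".js" || PySem.Str.endswith f ".ts" ||
        PySem.Str.endswith f ".tsx" || PySem.Str.endswith f ".jsx")) ||
      (fs.any (fun x => x == ".husky"))) = fs.any pvJsPred := by
  rw [Bool.eq_iff_iff]
  simp [List.any_eq_true, pvJsPred, pvJsNames]
  aesop

-- ===== VERDICT (by name: the statement is the Claim_ definition above) =====
theorem classify_project_language_spec : Claim_equal_classify_project_language := by
  intro fs _
  show _ = _
  simp only [classify_project_language, classify_project_language_alt, pv_fold_eq,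
    Nat.zero_or, pv_py_flag_eq, pv_js_flag_eq]
  cases fs.any pvPyPred <;> cases fs.any pvJsPred <;> rfl
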